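-- pv_equiv track=rewrite | github.com/Steccah/wordleanalysis | analysys.py | filter_words_by_banned_letters
-- ===== SOURCE A (Python) =====
-- def filter_words_by_banned_letters(words, banned_letters):
--     filtered_words = []
--     for word in words:
--         for pos in range(5):
--             if word[pos] in banned_letters[pos]:
--                 break
--         else:
--             filtered_words.append(word)
--     return filtered_words
-- ===== SOURCE B (Python) =====
-- def filter_words_by_banned_letters(words, banned_letters):
--     result = words
--     for pos in range(5):
--         result = [w for w in result if w[pos] not in banned_letters[pos]]
--     return result
-- ===== Notes on version B (the rewrite author's own statement) =====
-- stated objective: alternative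
-- what changed: Inverted the loop nesting: instead of A's per-word inner scan over the 5 positions with an early break, B makes five column-major whole-list filtering passes, one per position, preserving output order.
-- outside the precondition, e.g. on filter_words_by_banned_letters(['aaaaa'], [['a']]): A returns [], B returns []
import Mathlib
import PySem

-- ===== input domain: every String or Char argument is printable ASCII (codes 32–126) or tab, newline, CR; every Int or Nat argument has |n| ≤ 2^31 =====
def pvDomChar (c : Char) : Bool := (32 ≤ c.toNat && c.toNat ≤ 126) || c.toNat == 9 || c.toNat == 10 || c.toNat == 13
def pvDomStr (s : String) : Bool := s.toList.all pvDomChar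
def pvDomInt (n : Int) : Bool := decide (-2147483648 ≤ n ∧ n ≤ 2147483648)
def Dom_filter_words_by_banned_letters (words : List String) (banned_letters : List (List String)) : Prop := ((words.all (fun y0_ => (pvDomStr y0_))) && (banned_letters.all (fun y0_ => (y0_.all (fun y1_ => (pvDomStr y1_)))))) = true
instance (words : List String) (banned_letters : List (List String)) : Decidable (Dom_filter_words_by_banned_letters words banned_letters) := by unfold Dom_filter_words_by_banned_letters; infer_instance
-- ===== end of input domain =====

-- ===== PORT A =====
-- B inverts A's loop nesting (five column-major filtering passes instead of a per-word scan
-- with break); same cost, different traversal. Return-value equivalence; neither mutates.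

-- inner 'for pos in range(5): if word[pos] in banned_letters[pos]: break' with for-else:
-- returns true iff the loop broke (a banned letter was found).  Indexing uses getD defaults,
-- exact on Pre_ (all indices in range there; Python raises IndexError outside Pre_).
def pvBrokeA (word : List Char) (banned_letters : List (List String)) : Nat → Nat → Bool
  | _, 0 => false
  | pos, n + 1 =>
    if (banned_letters.getD pos []).contains (String.mk [word.getD pos ' ']) then true
    else pvBrokeA word banned_letters (pos + 1) n

def filter_words_by_banned_letters (words : List String) (banned_letters : List (List String)) : List String :=
  words.foldl (fun filtered_words word =>
    if pvBrokeA word.toList banned_letters 0 5 then filtered_words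
    else filtered_words ++ [word]) []

-- ===== PORT B =====
def pvKeepB (banned_letters : List (List String)) (pos : Nat) (w : String) : Bool :=
  !((banned_letters.getD pos []).contains (String.mk [w.toList.getD pos ' ']))

def filter_words_by_banned_letters_alt (words : List String) (banned_letters : List (List String)) : List String :=
  (List.range 5).foldl (fun result pos => result.filter (pvKeepB banned_letters pos)) words

-- ===== PRECONDITION & SPEC =====
-- Pre_ excludes inputs where some word or banned_letters has length < 5: A usually raises
-- IndexError there, but may happen to return when every word hits a banned letter before the
-- short index is reached (the exact no-raise condition is not closed-form); B agrees with A
-- on those accidental returns too, but they are outside the claim.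
def Pre_filter_words_by_banned_letters (words : List String) (banned_letters : List (List String)) : Prop :=
  words = [] ∨ ((∀ w ∈ words, 5 ≤ w.length) ∧ 5 ≤ banned_letters.length)
instance (words : List String) (banned_letters : List (List String)) : Decidable (Pre_filter_words_by_banned_letters words banned_letters) := by unfold Pre_filter_words_by_banned_letters; infer_instance

def pvWitness_filter_words_by_banned_letters : List String × List (List String) :=
  (["crane", "adieu"], [["a"], ["b"], ["c"], ["d"], ["e"]])

def Spec_filter_words_by_banned_letters (words : List String) (banned_letters : List (List String)) (out : List String) : Prop := out = filter_words_by_banned_letters_alt words banned_letters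
instance (words : List String) (banned_letters : List (List String)) (out : List String) : Decidable (Spec_filter_words_by_banned_letters words banned_letters out) := by unfold Spec_filter_words_by_banned_letters; infer_instance

-- ===== CLAIM (what is proved, stated in full; the proofs are below) =====
def Claim_equal_filter_words_by_banned_letters : Prop := ∀ (words : List String) (banned_letters : List (List String)), Dom_filter_words_by_banned_letters words banned_letters → Pre_filter_words_by_banned_letters words banned_letters → Spec_filter_words_by_banned_letters words banned_letters (filter_words_by_banned_letters words banned_letters)

-- ===== LEMMAS AND PROOFS =====

-- A = filter by "the inner loop did not break" (accumulator-generalized induction)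
theorem foldlA_eq_filter (banned_letters : List (List String)) (ws : List String)
    (acc : List String) :
    ws.foldl (fun filtered_words word =>
        if pvBrokeA word.toList banned_letters 0 5 then filtered_words
        else filtered_words ++ [word]) acc =
      acc ++ ws.filter (fun w => !pvBrokeA w.toList banned_letters 0 5) := by
  induction ws generalizing acc with
  | nil => simp
  | cons w ws ih =>
    simp only [List.foldl_cons, List.filter_cons]
    cases h : pvBrokeA w.toList banned_letters 0 5 <;> simp [ih]

theorem portA_eq_filter (words : List String) (banned_letters : List (List String)) :
    filter_words_by_banned_letters words banned_letters =
      words.filter (fun w => !pvBrokeA w.toList banned_letters 0 5) := by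
  unfold filter_words_by_banned_letters
  rw [foldlA_eq_filter]; rfl

-- pointwise: keeping at all five positions = the inner loop did not break
theorem keep_eq_not_broke (banned_letters : List (List String)) (w : String) :
    (pvKeepB banned_letters 0 w && (pvKeepB banned_letters 1 w && (pvKeepB banned_letters 2 w &&
      (pvKeepB banned_letters 3 w && pvKeepB banned_letters 4 w)))) =
      !pvBrokeA w.toList banned_letters 0 5 := by
  simp only [pvKeepB, pvBrokeA]
  cases (banned_letters.getD 0 []).contains (String.mk [w.toList.getD 0 ' ']) <;>
  cases (banned_letters.getD 1 []).contains (String.mk [w.toList.getD 1 ' ']) <;>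
  cases (banned_letters.getD 2 []).contains (String.mk [w.toList.getD 2 ' ']) <;>
  cases (banned_letters.getD 3 []).contains (String.mk [w.toList.getD 3 ' ']) <;>
  cases (banned_letters.getD 4 []).contains (String.mk [w.toList.getD 4 ' ']) <;> rfl

-- ===== VERDICT (by name: the statement is the Claim_ definition above) =====
theorem filter_words_by_banned_letters_spec : Claim_equal_filter_words_by_banned_letters := by
  intro words banned_letters _ _
  unfold Spec_filter_words_by_banned_letters filter_words_by_banned_letters_alt
  rw [portA_eq_filter]
  simp only [List.range_succ, List.range_zero, List.nil_append, List.cons_append,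
    List.foldl_cons, List.foldl_nil, List.filter_filter]
  apply List.filter_congr
  intro w _
  rw [← keep_eq_not_broke]
  cases pvKeepB banned_letters 0 w <;> cases pvKeepB banned_letters 1 w <;>
    cases pvKeepB banned_letters 2 w <;> cases pvKeepB banned_letters 3 w <;>
      cases pvKeepB banned_letters 4 w <;> rfl
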